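-- pv_equiv track=rewrite | github.com/yejin7211/Algorithm | 프로그래머스/lv1/42840. 모의고사/모의고사.py | solution
-- ===== SOURCE A (Python) =====
-- def solution(ans):
--     p = [[], [], []]
--     while len(p[0]) < len(ans):
--         for n in [1, 2, 3, 4, 5]:
--             if len(p[0]) == len(ans):
--                 break
--             p[0].append(n)
--         for n in [2, 1, 2, 3, 2, 4, 2, 5]:
--             if len(p[1]) == len(ans):
--                 break
--             p[1].append(n)
--         for n in [3, 3, 1, 1, 2, 2, 4, 4, 5, 5]:
--             if len(p[2]) == len(ans):
--                 break
--             p[2].append(n)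
--
--     scores = [0, 0, 0]
--     for i in range(len(ans)):
--         for j in range(3):
--             if ans[i] == p[j][i]:
--                 scores[j] += 1
--
--     answer = []
--     max_score = max(scores)
--     for i in range(len(scores)):
--         if scores[i] == max_score:
--             answer.append(i + 1)
--     return answer
-- ===== SOURCE B (Python) =====
-- PATTERNS = ([1, 2, 3, 4, 5], [2, 1, 2, 3, 2, 4, 2, 5], [3, 3, 1, 1, 2, 2, 4, 4, 5, 5])
--
--
-- def solution(ans):
--     # One counting pass builds a histogram keyed by (position mod 40, answer);
--     # 40 = lcm(5, 8, 10), so each pattern's expected answer depends only on the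
--     # position mod 40.  Scoring then needs only 3 * 40 constant dict lookups,
--     # independent of the data: score_j = sum over residues r of how many
--     # positions i = r (mod 40) carried exactly pattern_j's answer for r.
--     hist = {}
--     for i, a in enumerate(ans):
--         hist[(i % 40, a)] = hist.get((i % 40, a), 0) + 1
--     scores = [sum(hist.get((r, p[r % len(p)]), 0) for r in range(40))
--               for p in PATTERNS]
--     m = max(scores)
--     return [j + 1 for j in range(3) if scores[j] == m]
-- ===== Notes on version B (the rewrite author's own statement) =====
-- stated objective: alternative
-- what changed: B replaces A's materialise-three-full-length-pattern-lists-and-compare scheme by a histogram algorithm: one pass builds a dict counting (position mod 40, answer) pairs (40 = lcm of the pattern periods), then each score is a data-independent sum of 40 dict lookups.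
import Mathlib
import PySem

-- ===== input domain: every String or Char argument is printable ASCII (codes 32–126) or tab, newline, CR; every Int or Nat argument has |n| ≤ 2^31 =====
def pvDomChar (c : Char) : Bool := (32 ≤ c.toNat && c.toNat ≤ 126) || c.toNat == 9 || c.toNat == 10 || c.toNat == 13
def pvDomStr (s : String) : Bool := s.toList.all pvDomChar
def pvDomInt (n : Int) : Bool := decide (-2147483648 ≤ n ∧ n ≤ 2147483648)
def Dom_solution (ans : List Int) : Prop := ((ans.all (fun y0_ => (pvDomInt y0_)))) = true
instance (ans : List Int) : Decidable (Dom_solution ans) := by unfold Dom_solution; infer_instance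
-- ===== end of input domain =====

-- B replaces A's compare-against-materialised-pattern-lists scheme by a different algorithm:
-- one pass builds a histogram dict keyed by (position mod 40, answer) — 40 = lcm(5,8,10) —
-- and each score is then a data-independent sum of 40 dict lookups (alternative, same O(n)).

-- ===== PORT A =====
-- the three single periods A cycles through
def pvC1 : List Int := [1, 2, 3, 4, 5]
def pvC2 : List Int := [2, 1, 2, 3, 2, 4, 2, 5]
def pvC3 : List Int := [3, 3, 1, 1, 2, 2, 4, 4, 5, 5]

-- one inner 'for n in [...]' loop of A: append the period's elements to the row,
-- breaking as soon as the row reaches length n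
def pvFillTo (n : Nat) (pat : List Int) (acc : List Int) : List Int :=
  match pat with
  | [] => acc
  | x :: xs => if acc.length = n then acc else pvFillTo n xs (acc ++ [x])

-- A's 'while len(p[0]) < len(ans)' loop; fuel = n iterations suffice since p[0] grows
-- by at least one element per iteration while shorter than n (fuel is a totality guard only)
def pvBuild (fuel n : Nat) (p0 p1 p2 : List Int) : List Int × List Int × List Int :=
  match fuel with
  | 0 => (p0, p1, p2)
  | f + 1 =>
    if p0.length < n then
      pvBuild f n (pvFillTo n pvC1 p0) (pvFillTo n pvC2 p1) (pvFillTo n pvC3 p2)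
    else (p0, p1, p2)

def solution (ans : List Int) : List Int :=
  let p := pvBuild ans.length ans.length [] [] []
  -- for i in range(len(ans)): for j in range(3): … (the constant j-loop is unrolled);
  -- every subscript is in range, so pyGetD's default is never used
  let s := (PySem.List.pyRange 0 (PySem.List.len ans) 1).foldl
    (fun (s : Int × Int × Int) i =>
      (if PySem.List.pyGetD ans i 0 = PySem.List.pyGetD p.1 i 0 then s.1 + 1 else s.1,
       if PySem.List.pyGetD ans i 0 = PySem.List.pyGetD p.2.1 i 0 then s.2.1 + 1 else s.2.1,
       if PySem.List.pyGetD ans i 0 = PySem.List.pyGetD p.2.2 i 0 then s.2.2 + 1 else s.2.2))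
    (0, 0, 0)
  let m := (PySem.List.max? [s.1, s.2.1, s.2.2] (fun y => y)).getD 0
  -- for i in range(3): if scores[i] == max_score: answer.append(i+1)
  (if s.1 = m then [1] else []) ++ (if s.2.1 = m then [2] else []) ++
    (if s.2.2 = m then [3] else [])

-- ===== PORT B =====
def solution_alt (ans : List Int) : List Int :=
  -- hist[(i % 40, a)] = hist.get((i % 40, a), 0) + 1 over enumerate(ans)
  let hist := (PySem.List.enumerate ans).foldl
    (fun (d : PySem.Dict (Int × Int) Int) q =>
      d.insert (PySem.Int.mod q.1 40, q.2) (d.getD (PySem.Int.mod q.1 40, q.2) 0 + 1))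
    PySem.Dict.empty
  -- scores = [sum(hist.get((r, p[r % len(p)]), 0) for r in range(40)) for p in PATTERNS]
  let scores := [pvC1, pvC2, pvC3].map (fun p =>
    ((PySem.List.pyRange 0 40 1).map (fun r =>
      hist.getD (r, PySem.List.pyGetD p (PySem.Int.mod r (PySem.List.len p)) 0) 0)).sum)
  let m := (PySem.List.max? scores (fun y => y)).getD 0
  -- [j + 1 for j in range(3) if scores[j] == m]
  ((PySem.List.pyRange 0 3 1).filter (fun j => PySem.List.pyGetD scores j 0 == m)).map
    (fun j => j + 1)

-- ===== PRECONDITION & SPEC =====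
def Spec_solution (ans : List Int) (out : List Int) : Prop := out = solution_alt ans
instance (ans : List Int) (out : List Int) : Decidable (Spec_solution ans out) := by unfold Spec_solution; infer_instance

-- ===== CLAIM (what is proved, stated in full; the proofs are below) =====
def Claim_equal_solution : Prop := ∀ (ans : List Int), Dom_solution ans → Spec_solution ans (solution ans)

-- ===== LEMMAS AND PROOFS =====

-- proof-side characterisation of A's materialised rows: the cyclic expansion of a period
def pvExpand (cyc : List Int) (m : Nat) : List Int :=
  (List.range m).map (fun i => cyc.getD (i % cyc.length) 0)

theorem pvExpand_length (cyc : List Int) (m : Nat) : (pvExpand cyc m).length = m := by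
  simp [pvExpand]

theorem pvC1_len : pvC1.length = 5 := rfl
theorem pvC2_len : pvC2.length = 8 := rfl
theorem pvC3_len : pvC3.length = 10 := rfl

theorem pvFillTo_eq (n : Nat) (pat : List Int) (acc : List Int) (h : acc.length ≤ n) :
    pvFillTo n pat acc = acc ++ pat.take (n - acc.length) := by
  induction pat generalizing acc with
  | nil => simp [pvFillTo]
  | cons x xs ih =>
    by_cases hl : acc.length = n
    · simp [pvFillTo, hl]
    · have hlt : acc.length < n := lt_of_le_of_ne h hl
      rw [pvFillTo, if_neg hl, ih (acc ++ [x]) (by simp; omega)]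
      have : n - acc.length = (n - (acc ++ [x]).length) + 1 := by simp; omega
      rw [this, List.take_succ_cons, List.append_assoc]
      rfl

theorem pvTake_eq_map_range (cyc : List Int) (t : Nat) (ht : t ≤ cyc.length) :
    cyc.take t = (List.range t).map (fun j => cyc.getD j 0) := by
  apply List.ext_getElem
  · simp; omega
  · intro i h1 h2
    have hi : i < cyc.length := by simp at h1; omega
    simp only [List.getElem_take, List.getElem_map, List.getElem_range]
    rw [List.getD_eq_getElem _ _ hi]

theorem pvExpand_step (cyc : List Int) (n m : Nat) (hmod : m % cyc.length = 0) (hmn : m ≤ n) :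
    pvExpand cyc m ++ cyc.take (n - m) = pvExpand cyc (min n (m + cyc.length)) := by
  have htake : cyc.take (n - m) = cyc.take (min (n - m) cyc.length) := by
    rcases le_total (n - m) cyc.length with h | h
    · rw [min_eq_left h]
    · rw [min_eq_right h, List.take_of_length_le (by omega), List.take_length]
  have hmin : min n (m + cyc.length) = m + min (n - m) cyc.length := by omega
  rw [htake, hmin]
  have htL : min (n - m) cyc.length ≤ cyc.length := min_le_right _ _
  unfold pvExpand
  rw [List.range_add, List.map_append, List.map_map]
  congr 1
  rw [pvTake_eq_map_range cyc _ htL]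
  apply List.map_congr_left
  intro j hj
  have hjt : j < min (n - m) cyc.length := List.mem_range.mp hj
  have hmj : (m + j) % cyc.length = j := by
    obtain ⟨c, hc⟩ := Nat.dvd_of_mod_eq_zero hmod
    rw [hc, Nat.mul_add_mod, Nat.mod_eq_of_lt (by omega)]
  simp [Function.comp, hmj]

theorem pvBuild_eq (n : Nat) : ∀ (f k : Nat), n ≤ 5 * k + 5 * f →
    pvBuild f n (pvExpand pvC1 (min n (5 * k))) (pvExpand pvC2 (min n (8 * k)))
        (pvExpand pvC3 (min n (10 * k)))
      = (pvExpand pvC1 n, pvExpand pvC2 n, pvExpand pvC3 n) := by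
  intro f
  induction f with
  | zero =>
    intro k hk
    have h1 : min n (5 * k) = n := by omega
    have h2 : min n (8 * k) = n := by omega
    have h3 : min n (10 * k) = n := by omega
    rw [h1, h2, h3]; rfl
  | succ f ih =>
    intro k hk
    by_cases hlt : 5 * k < n
    · have hm1 : min n (5 * k) = 5 * k := by omega
      rw [pvBuild, if_pos (by rw [pvExpand_length]; omega)]
      have e1 : pvFillTo n pvC1 (pvExpand pvC1 (min n (5 * k)))
          = pvExpand pvC1 (min n (5 * (k + 1))) := by
        rw [pvFillTo_eq n pvC1 _ (by rw [pvExpand_length]; omega),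
            pvExpand_length, hm1,
            pvExpand_step pvC1 n (5 * k)
              (by rw [pvC1_len]; omega) (by omega), pvC1_len]
        exact congrArg _ (by omega)
      have e2 : pvFillTo n pvC2 (pvExpand pvC2 (min n (8 * k)))
          = pvExpand pvC2 (min n (8 * (k + 1))) := by
        by_cases h8 : 8 * k < n
        · have hm2 : min n (8 * k) = 8 * k := by omega
          rw [pvFillTo_eq n pvC2 _ (by rw [pvExpand_length]; omega),
              pvExpand_length, hm2,
              pvExpand_step pvC2 n (8 * k)
                (by rw [pvC2_len]; omega) (by omega), pvC2_len]
          exact congrArg _ (by omega)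
        · have hm2 : min n (8 * k) = n := by omega
          have hm2' : min n (8 * (k + 1)) = n := by omega
          rw [pvFillTo_eq n pvC2 _ (by rw [pvExpand_length]; omega),
              pvExpand_length, hm2, hm2']
          simp
      have e3 : pvFillTo n pvC3 (pvExpand pvC3 (min n (10 * k)))
          = pvExpand pvC3 (min n (10 * (k + 1))) := by
        by_cases h10 : 10 * k < n
        · have hm3 : min n (10 * k) = 10 * k := by omega
          rw [pvFillTo_eq n pvC3 _ (by rw [pvExpand_length]; omega),
              pvExpand_length, hm3,
              pvExpand_step pvC3 n (10 * k)
                (by rw [pvC3_len]; omega) (by omega), pvC3_len]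
          exact congrArg _ (by omega)
        · have hm3 : min n (10 * k) = n := by omega
          have hm3' : min n (10 * (k + 1)) = n := by omega
          rw [pvFillTo_eq n pvC3 _ (by rw [pvExpand_length]; omega),
              pvExpand_length, hm3, hm3']
          simp
      rw [e1, e2, e3]
      exact ih (k + 1) (by omega)
    · have h1 : min n (5 * k) = n := by omega
      have h2 : min n (8 * k) = n := by omega
      have h3 : min n (10 * k) = n := by omega
      rw [h1, h2, h3, pvBuild, if_neg (by rw [pvExpand_length]; omega)]

theorem pvBuild_full (n : Nat) :
    pvBuild n n [] [] [] = (pvExpand pvC1 n, pvExpand pvC2 n, pvExpand pvC3 n) := by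
  have := pvBuild_eq n n 0 (by omega)
  simpa [pvExpand] using this

-- reading the expanded row at an in-range index is reading the period modulo its length
theorem pvExpand_get (cyc : List Int) (n i : Nat) (hi : i < n) (L : Int)
    (hL : L = (cyc.length : Int)) :
    PySem.List.pyGetD (pvExpand cyc n) (i : Int) 0
      = PySem.List.pyGetD cyc (PySem.Int.mod (i : Int) L) 0 := by
  subst hL
  rw [PySem.Int.mod_natCast, PySem.List.pyGetD_natCast, PySem.List.pyGetD_natCast]
  simp [pvExpand, List.getD_eq_getElem?_getD, hi]

-- the common normal form: person p's score is a 0/1-count over enumerate(ans)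
def pvN (ans p : List Int) : Int :=
  ((PySem.List.enumerate ans).countP
    (fun q => decide (q.2 = PySem.List.pyGetD p (PySem.Int.mod q.1 (PySem.List.len p)) 0)) : Int)

-- ----- A side: the triple score fold computes (pvN ans pvC1, pvN ans pvC2, pvN ans pvC3)
theorem pvScoresA (ans : List Int) :
    (PySem.List.pyRange 0 (PySem.List.len ans) 1).foldl
      (fun (s : Int × Int × Int) i =>
        (if PySem.List.pyGetD ans i 0 = PySem.List.pyGetD (pvExpand pvC1 ans.length) i 0
           then s.1 + 1 else s.1,
         if PySem.List.pyGetD ans i 0 = PySem.List.pyGetD (pvExpand pvC2 ans.length) i 0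
           then s.2.1 + 1 else s.2.1,
         if PySem.List.pyGetD ans i 0 = PySem.List.pyGetD (pvExpand pvC3 ans.length) i 0
           then s.2.2 + 1 else s.2.2))
      (0, 0, 0)
    = (pvN ans pvC1, pvN ans pvC2, pvN ans pvC3) := by
  have hcong : ∀ (s : Int × Int × Int) (i : Int),
      i ∈ PySem.List.pyRange 0 (PySem.List.len ans) 1 →
      ((if PySem.List.pyGetD ans i 0 = PySem.List.pyGetD (pvExpand pvC1 ans.length) i 0
          then s.1 + 1 else s.1,
        if PySem.List.pyGetD ans i 0 = PySem.List.pyGetD (pvExpand pvC2 ans.length) i 0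
          then s.2.1 + 1 else s.2.1,
        if PySem.List.pyGetD ans i 0 = PySem.List.pyGetD (pvExpand pvC3 ans.length) i 0
          then s.2.2 + 1 else s.2.2) : Int × Int × Int)
      = (if PySem.List.pyGetD ans i 0 = PySem.List.pyGetD pvC1 (PySem.Int.mod i 5) 0
           then s.1 + 1 else s.1,
         if PySem.List.pyGetD ans i 0 = PySem.List.pyGetD pvC2 (PySem.Int.mod i 8) 0
           then s.2.1 + 1 else s.2.1,
         if PySem.List.pyGetD ans i 0 = PySem.List.pyGetD pvC3 (PySem.Int.mod i 10) 0
           then s.2.2 + 1 else s.2.2) := by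
    intro s i hi
    have hi' : 0 ≤ i ∧ i < (ans.length : Int) := by
      have := (PySem.List.mem_pyRange_one (a := 0) (b := PySem.List.len ans) (x := i)).mp hi
      simpa [PySem.List.len] using this
    obtain ⟨it, rfl⟩ : ∃ it : Nat, i = (it : Int) := ⟨i.toNat, by omega⟩
    have hit : it < ans.length := by exact_mod_cast hi'.2
    simp only [pvExpand_get pvC1 ans.length it hit 5 (by rfl),
      pvExpand_get pvC2 ans.length it hit 8 (by rfl),
      pvExpand_get pvC3 ans.length it hit 10 (by rfl)]
  have h1 : List.foldl
      (fun (s : Int × Int × Int) (i : Int) =>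
        (if PySem.List.pyGetD ans i 0 = PySem.List.pyGetD (pvExpand pvC1 ans.length) i 0
           then s.1 + 1 else s.1,
         if PySem.List.pyGetD ans i 0 = PySem.List.pyGetD (pvExpand pvC2 ans.length) i 0
           then s.2.1 + 1 else s.2.1,
         if PySem.List.pyGetD ans i 0 = PySem.List.pyGetD (pvExpand pvC3 ans.length) i 0
           then s.2.2 + 1 else s.2.2))
      ((0, 0, 0) : Int × Int × Int) (PySem.List.pyRange 0 (PySem.List.len ans) 1)
    = List.foldl
      (fun (s : Int × Int × Int) (i : Int) =>
        (if PySem.List.pyGetD ans i 0 = PySem.List.pyGetD pvC1 (PySem.Int.mod i 5) 0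
           then s.1 + 1 else s.1,
         if PySem.List.pyGetD ans i 0 = PySem.List.pyGetD pvC2 (PySem.Int.mod i 8) 0
           then s.2.1 + 1 else s.2.1,
         if PySem.List.pyGetD ans i 0 = PySem.List.pyGetD pvC3 (PySem.Int.mod i 10) 0
           then s.2.2 + 1 else s.2.2))
      ((0, 0, 0) : Int × Int × Int) (PySem.List.pyRange 0 (PySem.List.len ans) 1) :=
    PySem.List.foldl_congr_mem _ _ _ _ hcong
  rw [h1]
  rw [PySem.List.foldl_prod_mk
    (f := fun (acc : Int) (i : Int) =>
      if PySem.List.pyGetD ans i 0 = PySem.List.pyGetD pvC1 (PySem.Int.mod i 5) 0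
        then acc + 1 else acc)
    (g := fun (t : Int × Int) (i : Int) =>
      (if PySem.List.pyGetD ans i 0 = PySem.List.pyGetD pvC2 (PySem.Int.mod i 8) 0
         then t.1 + 1 else t.1,
       if PySem.List.pyGetD ans i 0 = PySem.List.pyGetD pvC3 (PySem.Int.mod i 10) 0
         then t.2 + 1 else t.2))]
  rw [PySem.List.foldl_prod_mk
    (f := fun (acc : Int) (i : Int) =>
      if PySem.List.pyGetD ans i 0 = PySem.List.pyGetD pvC2 (PySem.Int.mod i 8) 0
        then acc + 1 else acc)
    (g := fun (acc : Int) (i : Int) =>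
      if PySem.List.pyGetD ans i 0 = PySem.List.pyGetD pvC3 (PySem.Int.mod i 10) 0
        then acc + 1 else acc)]
  rw [PySem.List.foldl_ite_add_one, PySem.List.foldl_ite_add_one, PySem.List.foldl_ite_add_one]
  unfold pvN
  rw [PySem.List.enumerate_eq_map_pyRange (d := 0), List.countP_map, List.countP_map,
    List.countP_map]
  simp [Function.comp_def, PySem.List.len, pvC1, pvC2, pvC3]

-- ----- B side
-- an indicator sum over a nodup index list hits exactly once
theorem pvIndicatorZero (rs : List Int) (f : Int → Int) (k : Int × Int) (h : k.1 ∉ rs) :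
    (rs.map (fun r => if ((r, f r) : Int × Int) == k then (1 : Int) else 0)).sum = 0 := by
  induction rs with
  | nil => simp
  | cons r rs ih =>
    have hr : ¬ (((r, f r) : Int × Int) == k) = true := by
      simp only [beq_iff_eq]
      intro he
      exact h (by simp [← he])
    simp only [List.map_cons, List.sum_cons, if_neg hr, ih (fun hm => h (List.mem_cons_of_mem _ hm)),
      zero_add]

theorem pvIndicator (rs : List Int) (f : Int → Int) (k : Int × Int)
    (hnd : rs.Nodup) (hk : k.1 ∈ rs) :
    (rs.map (fun r => if ((r, f r) : Int × Int) == k then (1 : Int) else 0)).sum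
      = if k.2 = f k.1 then 1 else 0 := by
  induction rs with
  | nil => cases hk
  | cons r rs ih =>
    rcases List.nodup_cons.mp hnd with ⟨hrn, hnd'⟩
    rcases List.mem_cons.mp hk with hr | hm
    · subst hr
      have hz := pvIndicatorZero rs f k hrn
      have hbeq : (((k.1, f k.1) : Int × Int) == k) = decide (k.2 = f k.1) := by
        rcases k with ⟨k1, k2⟩
        have h1 : (((k1, f k1) : Int × Int) == (k1, k2)) = decide (f k1 = k2) := by
          by_cases hfeq : f k1 = k2 <;> simp [hfeq]
        rw [h1, decide_eq_decide]
        exact eq_comm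
      simp only [List.map_cons, List.sum_cons, hz, add_zero, hbeq]
      by_cases hv : k.2 = f k.1 <;> simp [hv]
    · have hne : ¬ (((r, f r) : Int × Int) == k) = true := by
        simp only [beq_iff_eq]
        intro he
        exact hrn (by simpa [← he] using hm)
      simp only [List.map_cons, List.sum_cons, if_neg hne, zero_add, ih hnd' hm]

-- the key exchange: summing counts of (r, f r) over a nodup residue list that covers
-- every key's first component counts exactly the pairs whose value matches f of their residue
theorem pvSumCount (rs : List Int) (f : Int → Int) (K : List (Int × Int))
    (hnd : rs.Nodup) (hK : ∀ k ∈ K, k.1 ∈ rs) :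
    (rs.map (fun r => ((K.count ((r, f r) : Int × Int)) : Int))).sum
      = (K.countP (fun k => decide (k.2 = f k.1)) : Int) := by
  induction K with
  | nil => simp
  | cons k K ih =>
    have hterm : ∀ r : Int, (((k :: K).count ((r, f r) : Int × Int)) : Int)
        = ((K.count ((r, f r) : Int × Int)) : Int)
          + (if ((r, f r) : Int × Int) == k then (1 : Int) else 0) := by
      intro r
      rw [List.count_cons]
      by_cases h : k = ((r, f r) : Int × Int)
      · simp [h]
      · have h' : ¬ ((r, f r) : Int × Int) = k := fun he => h he.symm
        simp [h, h']
    simp only [hterm]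
    rw [PySem.List.sum_map_add_int, ih (fun x hx => hK x (List.mem_cons_of_mem _ hx)),
      pvIndicator rs f k hnd (hK k List.mem_cons_self), List.countP_cons]
    split_ifs with h1 h2 <;> simp_all

theorem pvRange40_nodup : (PySem.List.pyRange 0 40 1).Nodup := by decide

-- the histogram's lookup is a count over the keyed projection of enumerate(ans)
theorem pvHist_getD (ans : List Int) (k : Int × Int) :
    ((PySem.List.enumerate ans).foldl
      (fun (d : PySem.Dict (Int × Int) Int) q =>
        d.insert (PySem.Int.mod q.1 40, q.2) (d.getD (PySem.Int.mod q.1 40, q.2) 0 + 1))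
      PySem.Dict.empty).getD k 0
    = (((PySem.List.enumerate ans).map
        (fun q : Int × Int => ((PySem.Int.mod q.1 40, q.2) : Int × Int))).count k : Int) := by
  have e : (PySem.List.enumerate ans).foldl
      (fun (d : PySem.Dict (Int × Int) Int) q =>
        d.insert (PySem.Int.mod q.1 40, q.2) (d.getD (PySem.Int.mod q.1 40, q.2) 0 + 1))
      PySem.Dict.empty
    = ((PySem.List.enumerate ans).map
        (fun q : Int × Int => ((PySem.Int.mod q.1 40, q.2) : Int × Int))).foldl
      (fun (d : PySem.Dict (Int × Int) Int) x => d.insert x (d.getD x 0 + 1))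
      PySem.Dict.empty := by
    rw [List.foldl_map]
  rw [e, PySem.Dict.getD_foldl_insert_add_one]
  simp [PySem.Dict.getD_empty]

-- collapsing the inner mod-40: pattern length divides 40
theorem pvModMod (i L : Nat) (hL : L ∣ 40) :
    PySem.Int.mod (PySem.Int.mod (i : Int) 40) (L : Int) = PySem.Int.mod (i : Int) (L : Int) := by
  have h40 : (40 : Int) = ((40 : Nat) : Int) := by norm_num
  rw [h40, PySem.Int.mod_natCast, PySem.Int.mod_natCast, PySem.Int.mod_natCast,
    Nat.mod_mod_of_dvd i hL]

-- B's per-pattern score equals the common normal form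
theorem pvScoreB (ans p : List Int) (hdvd : p.length ∣ 40) :
    ((PySem.List.pyRange 0 40 1).map (fun r =>
      ((PySem.List.enumerate ans).foldl
        (fun (d : PySem.Dict (Int × Int) Int) q =>
          d.insert (PySem.Int.mod q.1 40, q.2) (d.getD (PySem.Int.mod q.1 40, q.2) 0 + 1))
        PySem.Dict.empty).getD
          (r, PySem.List.pyGetD p (PySem.Int.mod r (PySem.List.len p)) 0) 0)).sum
    = pvN ans p := by
  simp only [pvHist_getD]
  rw [pvSumCount (PySem.List.pyRange 0 40 1)
    (fun r => PySem.List.pyGetD p (PySem.Int.mod r (PySem.List.len p)) 0)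
    ((PySem.List.enumerate ans).map
      (fun q : Int × Int => ((PySem.Int.mod q.1 40, q.2) : Int × Int)))
    pvRange40_nodup]
  · rw [List.countP_map]
    unfold pvN
    congr 1
    apply List.countP_congr
    intro q hq
    rcases (PySem.List.mem_enumerate_iff _ _ _).mp hq with ⟨it, hit, rfl⟩
    simp only [Function.comp, zero_add]
    have : PySem.Int.mod (PySem.Int.mod ((it : Nat) : Int) 40) (PySem.List.len p)
        = PySem.Int.mod ((it : Nat) : Int) (PySem.List.len p) := by
      have := pvModMod it p.length hdvd
      simpa [PySem.List.len] using this
    rw [this]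
  · intro k hk
    rcases List.mem_map.mp hk with ⟨q, _, rfl⟩
    refine (PySem.List.mem_pyRange_one).mpr ⟨?_, ?_⟩
    · exact PySem.Int.mod_nonneg q.1 (by norm_num)
    · exact PySem.Int.mod_lt q.1 (by norm_num)

theorem pvMax_eq (a b c : Int) :
    (PySem.List.max? [a, b, c] (fun y => y)).getD 0 = max a (max b c) := by
  rw [PySem.List.max?_id_cons]
  simp [List.foldl, max_assoc]

theorem pvCollect (c1 c2 c3 m : Int) :
    ((if c1 = m then [1] else []) ++ (if c2 = m then [2] else []) ++
      (if c3 = m then [3] else []) : List Int)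
    = (([0, 1, 2].filter
        (fun j => PySem.List.pyGetD [c1, c2, c3] j 0 == m)).map (fun j => j + 1)) := by
  have h0 : PySem.List.pyGetD [c1, c2, c3] 0 0 = c1 := by simp [PySem.List.pyGetD]
  have h1 : PySem.List.pyGetD [c1, c2, c3] 1 0 = c2 := by simp [PySem.List.pyGetD]
  have h2 : PySem.List.pyGetD [c1, c2, c3] 2 0 = c3 := by simp [PySem.List.pyGetD]
  simp only [List.filter_cons, List.filter_nil, h0, h1, h2, beq_iff_eq]
  split_ifs <;> rfl

theorem solution_eq (ans : List Int) : solution ans = solution_alt ans := by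
  simp only [solution, solution_alt]
  rw [pvBuild_full]
  dsimp only
  rw [pvScoresA ans]
  simp only [List.map_cons, List.map_nil]
  rw [pvScoreB ans pvC1 (by rw [pvC1_len]; norm_num), pvScoreB ans pvC2 (by rw [pvC2_len]; norm_num),
    pvScoreB ans pvC3 (by rw [pvC3_len]; norm_num)]
  rw [pvMax_eq]
  have h3 : PySem.List.pyRange 0 3 1 = [0, 1, 2] := by decide
  rw [h3]
  exact pvCollect _ _ _ _

-- ===== VERDICT (by name: the statement is the Claim_ definition above) =====
theorem solution_spec : Claim_equal_solution := by
  intro ans _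
  unfold Spec_solution
  exact solution_eq ans
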